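-- pv_equiv track=rewrite | github.com/Lucas-PCN/restaurant-orders | src/analyze_log.py | which_dishes_never_ordered
-- ===== SOURCE A (Python) =====
-- def which_dishes_never_ordered(person_name, orders):
--     all_dishes = set()
--     ordered_by_someone = set()
--
--     for customer, dish, _ in orders:
--         all_dishes.add(dish)
--
--     for customer, dish, _ in orders:
--         if customer == person_name:
--             ordered_by_someone.add(dish)
--
--     return all_dishes - ordered_by_someone
-- ===== SOURCE B (Python) =====
-- def which_dishes_never_ordered(person_name, orders):
--     index = {}
--     for customer, dish, _ in orders:
--         index.setdefault(dish, set()).add(customer)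
--     return {dish for dish, custs in index.items() if person_name not in custs}
-- ===== Notes on version B (the rewrite author's own statement) =====
-- stated objective: alternative
-- what changed: B builds a single dish-to-customers index (dict of sets) in one pass over the orders and assembles the answer by a membership-test comprehension over that index, instead of A's two parallel set-building passes over the orders followed by a set subtraction.
import Mathlib
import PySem

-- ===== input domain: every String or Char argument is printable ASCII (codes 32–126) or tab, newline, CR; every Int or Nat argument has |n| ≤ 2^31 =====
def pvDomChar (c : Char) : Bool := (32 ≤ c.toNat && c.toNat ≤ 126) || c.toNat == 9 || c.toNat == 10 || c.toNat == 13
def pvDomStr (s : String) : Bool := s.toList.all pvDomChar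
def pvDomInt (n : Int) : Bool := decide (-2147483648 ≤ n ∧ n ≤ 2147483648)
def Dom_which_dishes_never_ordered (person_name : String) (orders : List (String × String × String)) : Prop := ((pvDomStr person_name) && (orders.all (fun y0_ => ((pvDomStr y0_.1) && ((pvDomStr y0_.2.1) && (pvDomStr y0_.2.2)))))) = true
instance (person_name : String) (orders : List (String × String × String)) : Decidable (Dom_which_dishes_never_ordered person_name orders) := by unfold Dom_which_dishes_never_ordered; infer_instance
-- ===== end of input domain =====

-- B builds a single dish → set-of-customers index in one pass and filters it, instead of
-- A's two flat set-building passes followed by a set subtraction (objective: alternative).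

-- ===== PORT A =====
def which_dishes_never_ordered (person_name : String) (orders : List (String × String × String)) : List String :=
  -- all_dishes = set(); for customer, dish, _ in orders: all_dishes.add(dish)
  -- ordered_by_someone = set(); for customer, dish, _ in orders: if customer == person_name: add(dish)
  -- return all_dishes - ordered_by_someone
  PySem.Set.diff
    (orders.foldl (fun s o => PySem.Set.add s o.2.1) PySem.Set.empty)
    (orders.foldl (fun s o => if o.1 == person_name then PySem.Set.add s o.2.1 else s) PySem.Set.empty)

-- ===== PORT B =====
def which_dishes_never_ordered_alt (person_name : String) (orders : List (String × String × String)) : List String :=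
  -- index = {}; for customer, dish, _ in orders: index.setdefault(dish, set()).add(customer)
  -- return {dish for dish, custs in index.items() if person_name not in custs}
  PySem.Set.ofList
    (((orders.foldl (fun d o => d.modify o.2.1 PySem.Set.empty (fun s => PySem.Set.add s o.1))
        PySem.Dict.empty).items.filter
        (fun p => !(PySem.Set.contains p.2 person_name))).map (·.1))

-- ===== PRECONDITION & SPEC =====
def Spec_which_dishes_never_ordered (person_name : String) (orders : List (String × String × String)) (out : List String) : Prop := out = which_dishes_never_ordered_alt person_name orders
instance (person_name : String) (orders : List (String × String × String)) (out : List String) : Decidable (Spec_which_dishes_never_ordered person_name orders out) := by unfold Spec_which_dishes_never_ordered; infer_instance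

-- ===== CLAIM (what is proved, stated in full; the proofs are below) =====
def Claim_equal_which_dishes_never_ordered : Prop := ∀ (person_name : String) (orders : List (String × String × String)), Dom_which_dishes_never_ordered person_name orders → Spec_which_dishes_never_ordered person_name orders (which_dishes_never_ordered person_name orders)

-- ===== LEMMAS AND PROOFS =====

-- membership in A's second set: dishes some order by `person` carries
theorem mem_ordered_fold (person : String) (l : List (String × String × String))
    (s : PySem.Set String) (k : String) :
    (k ∈ l.foldl (fun s o => if o.1 == person then PySem.Set.add s o.2.1 else s) s) ↔
      k ∈ s ∨ ∃ o ∈ l, o.1 = person ∧ o.2.1 = k := by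
  induction l generalizing s with
  | nil => simp
  | cons o l ih =>
    rw [List.foldl_cons]
    by_cases h : (o.1 == person) = true
    · rw [if_pos h, ih]
      have h' : o.1 = person := by simpa using h
      simp only [PySem.Set.mem_add, List.mem_cons]
      constructor
      · rintro ((hs | he) | ⟨o', ho', hp, hk⟩)
        · exact Or.inl hs
        · exact Or.inr ⟨o, Or.inl rfl, h', he.symm⟩
        · exact Or.inr ⟨o', Or.inr ho', hp, hk⟩
      · rintro (hs | ⟨o', (rfl | ho'), hp, hk⟩)
        · exact Or.inl (Or.inl hs)
        · exact Or.inl (Or.inr hk.symm)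
        · exact Or.inr ⟨o', ho', hp, hk⟩
    · rw [if_neg h, ih]
      have h' : ¬ o.1 = person := by simpa using h
      simp only [List.mem_cons]
      constructor
      · rintro (hs | ⟨o', ho', hp, hk⟩)
        · exact Or.inl hs
        · exact Or.inr ⟨o', Or.inr ho', hp, hk⟩
      · rintro (hs | ⟨o', (rfl | ho'), hp, hk⟩)
        · exact Or.inl hs
        · exact absurd hp h'
        · exact Or.inr ⟨o', ho', hp, hk⟩

-- membership of `person` in B's per-dish customer set after the indexing fold
theorem mem_getD_index_fold (person : String) (l : List (String × String × String))
    (d : PySem.Dict String (PySem.Set String)) (k : String) :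
    (person ∈ (l.foldl (fun d o => d.modify o.2.1 PySem.Set.empty (fun s => PySem.Set.add s o.1)) d).getD k PySem.Set.empty) ↔
      person ∈ d.getD k PySem.Set.empty ∨ ∃ o ∈ l, o.1 = person ∧ o.2.1 = k := by
  induction l generalizing d with
  | nil => simp
  | cons o l ih =>
    simp only [List.foldl_cons, List.mem_cons]
    rw [ih]
    rw [PySem.Dict.getD_modify]
    by_cases h : k = o.2.1
    · subst h
      simp [PySem.Set.mem_add]
      tauto
    · simp [h]
      tauto

-- ===== VERDICT (by name: the statement is the Claim_ definition above) =====
theorem which_dishes_never_ordered_spec : Claim_equal_which_dishes_never_ordered := by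
  intro person orders _
  unfold Spec_which_dishes_never_ordered which_dishes_never_ordered which_dishes_never_ordered_alt
  set step := fun (d : PySem.Dict String (PySem.Set String)) (o : String × String × String) =>
    d.modify o.2.1 PySem.Set.empty (fun s => PySem.Set.add s o.1) with hstep
  set d := orders.foldl step PySem.Dict.empty with hd
  -- the dict's keys are exactly A's all_dishes set (same first-occurrence order)
  have hkeys : d.keys = orders.foldl (fun s o => PySem.Set.add s o.2.1) PySem.Set.empty := by
    rw [hd, hstep]
    rw [PySem.Dict.keys_foldl_modify_key orders (fun o => o.2.1) PySem.Set.empty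
      (fun d o s => PySem.Set.add s o.1) PySem.Dict.empty]
    rw [PySem.Dict.keys_empty, ← PySem.Set.update_map_eq_foldl_add]
    rfl
  have hnd : d.keys.Nodup := by
    rw [hd, hstep]
    exact PySem.Dict.nodup_keys_foldl_modify_key orders (fun o => o.2.1) PySem.Set.empty
      (fun d o s => PySem.Set.add s o.1) PySem.Dict.empty (by simp [PySem.Dict.keys_empty])
  rw [PySem.Dict.items_eq_map_keys d hnd PySem.Set.empty]
  rw [List.filter_map, List.map_map]
  have hmapid : ∀ xs : List String,
      xs.map ((fun p : String × PySem.Set String => p.1) ∘ (fun k => (k, d.getD k PySem.Set.empty))) = xs := by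
    intro xs; simp [Function.comp_def]
  rw [hmapid]
  have hfilt : d.keys.filter ((fun p : String × PySem.Set String => !(PySem.Set.contains p.2 person)) ∘
        (fun k => (k, d.getD k PySem.Set.empty)))
      = d.keys.filter (fun k =>
          !((orders.foldl (fun s o => if o.1 == person then PySem.Set.add s o.2.1 else s) PySem.Set.empty).contains k)) := by
    apply List.filter_congr
    intro k _
    simp only [Function.comp]
    congr 1
    have h1 : (PySem.Set.contains (d.getD k PySem.Set.empty) person = true) ↔
        (∃ o ∈ orders, o.1 = person ∧ o.2.1 = k) := by
      rw [PySem.Set.contains_iff, hd, hstep, mem_getD_index_fold]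
      simp [PySem.Dict.getD_empty, PySem.Set.empty]
    have h2 : ((orders.foldl (fun s o => if o.1 == person then PySem.Set.add s o.2.1 else s) PySem.Set.empty).contains k = true) ↔
        (∃ o ∈ orders, o.1 = person ∧ o.2.1 = k) := by
      rw [PySem.Set.contains_iff, mem_ordered_fold]
      simp [PySem.Set.empty]
    rw [Bool.eq_iff_iff, h1, h2]
  rw [hfilt]
  have hndf : (d.keys.filter (fun k =>
      !((orders.foldl (fun s o => if o.1 == person then PySem.Set.add s o.2.1 else s) PySem.Set.empty).contains k))).Nodup :=
    hnd.filter _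
  rw [PySem.Set.ofList_eq_self_of_nodup _ hndf]
  rw [← hkeys]
  rfl
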